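-- pv_equiv track=rewrite | github.com/nanome-ai/mara-tool-MD | calc_res_dist/run.py | get_idx_from_resid
-- ===== SOURCE A (Python) =====
-- def get_idx_from_resid(resid):
--     """resid will be resname+res_index, i.e. ALA100. This function extracts the index part (100) as a string"""
--     resname = ""
--     idx = ""
--     for char in resid:
--         if not char.isdigit():
--             resname += char
--         else:
--             idx += char
--     if resname + idx != resid:
--         raise RuntimeError("Invalid resid! It should be resname+res_index, i.e. ALA100")
--     return idx
-- ===== SOURCE B (Python) =====
-- def get_idx_from_resid(resid):
--     """resid will be resname+res_index, i.e. ALA100. This function extracts the index part (100) as a string"""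
--     k = 0
--     for c in reversed(resid):
--         if not c.isdigit():
--             break
--         k += 1
--     i = len(resid) - k
--     if any(c.isdigit() for c in resid[:i]):
--         raise RuntimeError("Invalid resid! It should be resname+res_index, i.e. ALA100")
--     return resid[i:]
-- ===== Notes on version B (the rewrite author's own statement) =====
-- stated objective: faster
-- what changed: Instead of accumulating two strings character-by-character over the whole input and comparing their concatenation back against the input, B scans from the end to count the trailing digit run, slices the suffix out once, and validates by checking the prefix for digits.
import Mathlib
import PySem

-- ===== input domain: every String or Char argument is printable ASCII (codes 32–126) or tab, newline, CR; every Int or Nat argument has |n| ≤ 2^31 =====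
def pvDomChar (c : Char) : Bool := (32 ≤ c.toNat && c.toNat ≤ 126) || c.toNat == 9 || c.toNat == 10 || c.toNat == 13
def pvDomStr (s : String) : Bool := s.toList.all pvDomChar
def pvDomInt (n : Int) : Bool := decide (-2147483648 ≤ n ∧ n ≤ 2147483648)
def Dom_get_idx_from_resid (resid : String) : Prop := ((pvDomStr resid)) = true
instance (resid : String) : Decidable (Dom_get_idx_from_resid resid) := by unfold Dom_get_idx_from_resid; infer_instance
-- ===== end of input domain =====

-- B: reverse scan counting the trailing digit run + a prefix slice, instead of A's
-- two accumulated strings compared by concatenation; alternative decomposition, return value only.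

-- ===== PORT A =====
def get_idx_from_resid (resid : String) : String :=
  let st := resid.toList.foldl
    (fun (st : List Char × List Char) c =>
      if ¬ c.isDigit then (st.1 ++ [c], st.2) else (st.1, st.2 ++ [c]))
    ([], [])
  -- Python raises RuntimeError when st.1 ++ st.2 ≠ resid.toList; those inputs are excluded by Pre_
  String.ofList st.2

-- ===== PORT B =====
-- the `for c in reversed(resid): if not c.isdigit(): break; k += 1` loop of Source B
def pvTrailingDigits : List Char → Nat
  | [] => 0
  | c :: rest => if ¬ c.isDigit then 0 else pvTrailingDigits rest + 1

def get_idx_from_resid_alt (resid : String) : String :=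
  let l := resid.toList
  let k := pvTrailingDigits l.reverse
  let i := l.length - k
  -- Python raises RuntimeError when resid[:i] contains a digit; those inputs are excluded by Pre_
  String.ofList (l.drop i)

-- ===== PRECONDITION & SPEC =====
-- Pre_ excludes exactly the inputs on which A raises RuntimeError: strings in which
-- a non-digit character occurs after a digit (resid is not of the form nondigits++digits).
def Pre_get_idx_from_resid (resid : String) : Prop :=
  (resid.toList.dropWhile (fun c => !c.isDigit)).all (fun c => c.isDigit) = true
instance (resid : String) : Decidable (Pre_get_idx_from_resid resid) := by
  unfold Pre_get_idx_from_resid; infer_instance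

def pvWitness_get_idx_from_resid : String := "ALA100"

def Spec_get_idx_from_resid (resid : String) (out : String) : Prop := out = get_idx_from_resid_alt resid
instance (resid : String) (out : String) : Decidable (Spec_get_idx_from_resid resid out) := by unfold Spec_get_idx_from_resid; infer_instance

-- ===== CLAIM (what is proved, stated in full; the proofs are below) =====
def Claim_equal_get_idx_from_resid : Prop := ∀ (resid : String), Dom_get_idx_from_resid resid → Pre_get_idx_from_resid resid → Spec_get_idx_from_resid resid (get_idx_from_resid resid)

-- ===== LEMMAS AND PROOFS =====

theorem pv_foldA (l r d : List Char) :
    l.foldl (fun (st : List Char × List Char) c =>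
      if ¬ c.isDigit then (st.1 ++ [c], st.2) else (st.1, st.2 ++ [c])) (r, d)
    = (r ++ l.filter (fun c => !c.isDigit), d ++ l.filter (fun c => c.isDigit)) := by
  induction l generalizing r d with
  | nil => simp
  | cons c t ih =>
    by_cases hc : c.isDigit = true
    · rw [List.foldl_cons, if_neg (by simp [hc]), ih]
      simp [hc]
    · rw [List.foldl_cons, if_pos (by simpa using hc), ih]
      simp [hc]

theorem pv_td_append (b x : List Char) (h : ∀ c ∈ b, c.isDigit = true) :
    pvTrailingDigits (b ++ x) = b.length + pvTrailingDigits x := by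
  induction b with
  | nil => simp
  | cons c t ih =>
    have hc := h c (by simp)
    simp only [List.cons_append, pvTrailingDigits, hc]
    rw [ih (fun c hc => h c (by simp [hc]))]
    simp; omega

theorem pv_td_zero (x : List Char) (h : ∀ c ∈ x, c.isDigit = false) :
    pvTrailingDigits x = 0 := by
  cases x with
  | nil => rfl
  | cons c t => simp [pvTrailingDigits, h c (by simp)]

-- ===== VERDICT (by name: the statement is the Claim_ definition above) =====

theorem get_idx_from_resid_spec : Claim_equal_get_idx_from_resid := by
  intro resid _ hpre
  unfold Spec_get_idx_from_resid get_idx_from_resid get_idx_from_resid_alt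
  set l := resid.toList with hl
  set a := l.takeWhile (fun c => !c.isDigit) with ha
  set b := l.dropWhile (fun c => !c.isDigit) with hb
  have hab : a ++ b = l := List.takeWhile_append_dropWhile
  have hbd : ∀ c ∈ b, c.isDigit = true := by
    intro c hc
    have := List.all_eq_true.mp hpre c hc
    simpa using this
  have had : ∀ c ∈ a, c.isDigit = false := by
    intro c hc
    have := List.mem_takeWhile_imp (l := l) (p := fun c => !c.isDigit) (by simpa [ha] using hc)
    simpa using this
  -- A's accumulator result
  rw [pv_foldA]
  -- filter over l = a ++ b
  have hfa : l.filter (fun c => c.isDigit) = b := by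
    rw [← hab, List.filter_append,
        List.filter_eq_nil_iff.mpr (by intro c hc; simp [had c hc]),
        List.filter_eq_self.mpr (by intro c hc; simpa using hbd c hc)]
    simp
  -- B's trailing-digit count
  have hrev : l.reverse = b.reverse ++ a.reverse := by
    rw [← hab, List.reverse_append]
  have hk : pvTrailingDigits l.reverse = b.length := by
    rw [hrev, pv_td_append _ _ (by intro c hc; exact hbd c (List.mem_reverse.mp hc)),
        pv_td_zero _ (by intro c hc; exact had c (List.mem_reverse.mp hc))]
    simp
  have hlen : l.length = a.length + b.length := by rw [← hab]; simp
  have hdrop : l.drop (l.length - pvTrailingDigits l.reverse) = b := by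
    rw [hk, hlen, Nat.add_sub_cancel, ← hab, List.drop_left]
  simp only [hfa, hdrop]
  simp
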